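-- pv_equiv track=rewrite | github.com/YanJiangJerry/Block-R1 | rl/eval/guru_dataset.py | _infer_skill
-- ===== SOURCE A (Python) =====
-- from typing import Any, Dict, List, Optional, Tuple
--
-- def _infer_skill(ability: Optional[str], data_source: Optional[str]) -> str:
--     a = (ability or "").lower().strip()
--     ds = (data_source or "").lower().strip()
--     if a == "codegen" or any(
--         x in ds
--         for x in (
--             "leetcode",
--             "taco",
--             "livecode",
--             "primeintellect",
--             "codegen",
--             "lcb",
--         )
--     ):
--         return "code"
--     if a == "math" or any(
--         x in ds for x in ("math", "dapo", "deepscaler", "or1", "skywork")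
--     ):
--         return "math"
--     if any(
--         x in ds
--         for x in (
--             "mmlu",
--             "hellaswag",
--             "arc",
--             "gpqa",
--             "multiple_choice",
--             "multiplechoice",
--         )
--     ):
--         return "mc"
--     if any(x in ds for x in ("hitab", "multihiertt", "table", "tabular")):
--         return "table"
--     if any(x in ds for x in ("arc-agi", "barc", "puzzle", "logic", "zebra")):
--         return "logic"
--     return "other"
-- ===== SOURCE B (Python) =====
-- from typing import Optional
--
-- _KEYWORD_PRIORITY = {
--     "leetcode": 0, "taco": 0, "livecode": 0, "primeintellect": 0, "codegen": 0, "lcb": 0,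
--     "math": 1, "dapo": 1, "deepscaler": 1, "or1": 1, "skywork": 1,
--     "mmlu": 2, "hellaswag": 2, "arc": 2, "gpqa": 2, "multiple_choice": 2, "multiplechoice": 2,
--     "hitab": 3, "multihiertt": 3, "table": 3, "tabular": 3,
--     "arc-agi": 4, "barc": 4, "puzzle": 4, "logic": 4, "zebra": 4,
-- }
-- _LABELS = ("code", "math", "mc", "table", "logic", "other")
--
-- def _infer_skill(ability: Optional[str], data_source: Optional[str]) -> str:
--     a = (ability or "").lower().strip()
--     ds = (data_source or "").lower().strip()
--     best = 5
--     if a == "codegen":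
--         best = 0
--     elif a == "math":
--         best = 1
--     for kw, pri in _KEYWORD_PRIORITY.items():
--         if pri < best and kw in ds:
--             best = pri
--     return _LABELS[best]
-- ===== Notes on version B (the rewrite author's own statement) =====
-- stated objective: alternative
-- what changed: Replaces A's ordered cascade of five early-return branches (each an any() over its own substring tuple) with a single min-priority reduction over one flat keyword-to-priority map followed by indexing a label tuple; the branch chain and early returns disappear and keyword order no longer matters.
import Mathlib
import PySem

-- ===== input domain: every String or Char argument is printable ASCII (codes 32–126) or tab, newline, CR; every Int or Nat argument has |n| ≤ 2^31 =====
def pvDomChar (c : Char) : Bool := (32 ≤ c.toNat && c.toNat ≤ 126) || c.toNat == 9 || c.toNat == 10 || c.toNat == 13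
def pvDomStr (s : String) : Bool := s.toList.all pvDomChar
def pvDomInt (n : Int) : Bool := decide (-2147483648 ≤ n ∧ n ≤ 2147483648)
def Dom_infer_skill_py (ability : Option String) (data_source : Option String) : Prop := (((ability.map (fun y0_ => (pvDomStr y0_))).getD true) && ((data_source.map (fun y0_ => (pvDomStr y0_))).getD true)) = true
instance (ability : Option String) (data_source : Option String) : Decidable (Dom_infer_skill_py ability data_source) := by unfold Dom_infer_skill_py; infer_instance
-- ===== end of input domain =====

-- B replaces A's ordered cascade of five early-return branches with a single min-priority
-- reduction over one flat keyword→priority map (alternative decomposition, same cost).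

-- ===== PORT A =====
def infer_skill_py (ability : Option String) (data_source : Option String) : String :=
  let a := PySem.Str.strip (PySem.Str.lower (ability.getD ""))
  let ds := PySem.Str.strip (PySem.Str.lower (data_source.getD ""))
  if a == "codegen" || ["leetcode", "taco", "livecode", "primeintellect", "codegen", "lcb"].any (fun x => PySem.Str.isIn x ds) then "code"
  else if a == "math" || ["math", "dapo", "deepscaler", "or1", "skywork"].any (fun x => PySem.Str.isIn x ds) then "math"
  else if ["mmlu", "hellaswag", "arc", "gpqa", "multiple_choice", "multiplechoice"].any (fun x => PySem.Str.isIn x ds) then "mc"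
  else if ["hitab", "multihiertt", "table", "tabular"].any (fun x => PySem.Str.isIn x ds) then "table"
  else if ["arc-agi", "barc", "puzzle", "logic", "zebra"].any (fun x => PySem.Str.isIn x ds) then "logic"
  else "other"

-- ===== PORT B =====
-- _KEYWORD_PRIORITY as an association list in insertion order (all keys distinct).
def pvKW : List (String × Nat) :=
  [ ("leetcode", 0), ("taco", 0), ("livecode", 0), ("primeintellect", 0), ("codegen", 0), ("lcb", 0),
    ("math", 1), ("dapo", 1), ("deepscaler", 1), ("or1", 1), ("skywork", 1),
    ("mmlu", 2), ("hellaswag", 2), ("arc", 2), ("gpqa", 2), ("multiple_choice", 2), ("multiplechoice", 2),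
    ("hitab", 3), ("multihiertt", 3), ("table", 3), ("tabular", 3),
    ("arc-agi", 4), ("barc", 4), ("puzzle", 4), ("logic", 4), ("zebra", 4) ]

def pvLabels : List String := ["code", "math", "mc", "table", "logic", "other"]

def infer_skill_py_alt (ability : Option String) (data_source : Option String) : String :=
  let a := PySem.Str.strip (PySem.Str.lower (ability.getD ""))
  let ds := PySem.Str.strip (PySem.Str.lower (data_source.getD ""))
  let best0 : Nat := if a == "codegen" then 0 else if a == "math" then 1 else 5
  let best := pvKW.foldl (fun b kp => if kp.2 < b && PySem.Str.isIn kp.1 ds then kp.2 else b) best0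
  -- _LABELS[best]: best is always ≤ 5 = len(_LABELS) - 1, so plain list indexing is exact here
  pvLabels.getD best "other"

-- ===== PRECONDITION & SPEC =====
def Spec_infer_skill_py (ability : Option String) (data_source : Option String) (out : String) : Prop := out = infer_skill_py_alt ability data_source
instance (ability : Option String) (data_source : Option String) (out : String) : Decidable (Spec_infer_skill_py ability data_source out) := by unfold Spec_infer_skill_py; infer_instance

-- ===== CLAIM (what is proved, stated in full; the proofs are below) =====
def Claim_equal_infer_skill_py : Prop := ∀ (ability : Option String) (data_source : Option String), Dom_infer_skill_py ability data_source → Spec_infer_skill_py ability data_source (infer_skill_py ability data_source)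

-- ===== LEMMAS AND PROOFS =====

-- the right-fold step "take the min of each matched keyword's priority"
def pvMinStep (ds : String) : String × Nat → Nat → Nat :=
  fun kp acc => if PySem.Str.isIn kp.1 ds then min kp.2 acc else acc

theorem pv_foldr_min_base (ds : String) (L : List (String × Nat)) (b c : Nat) :
    L.foldr (pvMinStep ds) (min b c) = min b (L.foldr (pvMinStep ds) c) := by
  induction L with
  | nil => rfl
  | cons kp L ih =>
      simp only [List.foldr, ih, pvMinStep]
      by_cases hq : PySem.Str.isIn kp.1 ds = true
      · rw [if_pos hq, if_pos hq]; omega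
      · rw [if_neg hq, if_neg hq]

-- B's guarded-update left fold equals the min-taking right fold.
theorem pv_foldl_eq_foldr_min (ds : String) (L : List (String × Nat)) (b : Nat) :
    L.foldl (fun b kp => if kp.2 < b && PySem.Str.isIn kp.1 ds then kp.2 else b) b
      = L.foldr (pvMinStep ds) b := by
  induction L generalizing b with
  | nil => rfl
  | cons kp L ih =>
      simp only [List.foldl, List.foldr, ih]
      by_cases hq : PySem.Str.isIn kp.1 ds = true
      · have hstep : (if kp.2 < b && PySem.Str.isIn kp.1 ds then kp.2 else b) = min kp.2 b := by
          simp only [hq, Bool.and_true, decide_eq_true_eq]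
          split <;> omega
        rw [hstep, pv_foldr_min_base]
        simp only [pvMinStep]
        rw [if_pos hq]
      · rw [Bool.not_eq_true] at hq
        have hstep : (if kp.2 < b && PySem.Str.isIn kp.1 ds then kp.2 else b) = b := by
          rw [hq, Bool.and_false]; rfl
        rw [hstep]
        simp only [pvMinStep, hq]
        rw [if_neg Bool.false_ne_true]

-- A segment whose pairs all carry the same priority p folds to a single any-test.
theorem pv_foldr_group (ds : String) (p : Nat) (g : List (String × Nat))
    (hg : ∀ kp ∈ g, kp.2 = p) (base : Nat) :
    g.foldr (pvMinStep ds) base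
      = if g.any (fun kp => PySem.Str.isIn kp.1 ds) then min p base else base := by
  induction g with
  | nil => simp
  | cons kp g ih =>
      have hp : kp.2 = p := hg kp (by simp)
      have ih' := ih (fun x hx => hg x (by simp [hx]))
      simp only [List.foldr, List.any_cons, ih', pvMinStep, hp]
      by_cases hq : PySem.Str.isIn kp.1 ds = true
      · simp only [hq, Bool.true_or, if_true]
        split <;> omega
      · rw [Bool.not_eq_true] at hq
        simp only [hq, Bool.false_or]
        rw [if_neg Bool.false_ne_true]

-- ===== VERDICT (by name: the statement is the Claim_ definition above) =====
set_option maxHeartbeats 2000000 in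
theorem infer_skill_py_spec : Claim_equal_infer_skill_py := by
  intro ability data_source _
  unfold Spec_infer_skill_py
  simp only [infer_skill_py, infer_skill_py_alt]
  set a := PySem.Str.strip (PySem.Str.lower (ability.getD "")) with ha
  set ds := PySem.Str.strip (PySem.Str.lower (data_source.getD "")) with hds
  have hsplit : pvKW =
      [("leetcode",0),("taco",0),("livecode",0),("primeintellect",0),("codegen",0),("lcb",0)]
      ++ ([("math",1),("dapo",1),("deepscaler",1),("or1",1),("skywork",1)]
      ++ ([("mmlu",2),("hellaswag",2),("arc",2),("gpqa",2),("multiple_choice",2),("multiplechoice",2)]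
      ++ ([("hitab",3),("multihiertt",3),("table",3),("tabular",3)]
      ++ [("arc-agi",4),("barc",4),("puzzle",4),("logic",4),("zebra",4)]))) := by rfl
  rw [pv_foldl_eq_foldr_min ds, hsplit]
  rw [List.foldr_append, List.foldr_append, List.foldr_append, List.foldr_append]
  rw [pv_foldr_group ds 0 _ (by decide), pv_foldr_group ds 1 _ (by decide),
      pv_foldr_group ds 2 _ (by decide), pv_foldr_group ds 3 _ (by decide),
      pv_foldr_group ds 4 _ (by decide)]
  simp only [List.any_cons, List.any_nil, Bool.or_false]
  rcases Bool.eq_false_or_eq_true (a == "codegen") with e0|e0 <;>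
  rcases Bool.eq_false_or_eq_true (a == "math") with e1|e1 <;>
  rcases Bool.eq_false_or_eq_true ((PySem.Str.isIn "leetcode" ds || (PySem.Str.isIn "taco" ds || (PySem.Str.isIn "livecode" ds || (PySem.Str.isIn "primeintellect" ds || (PySem.Str.isIn "codegen" ds || PySem.Str.isIn "lcb" ds)))))) with m0|m0 <;>
  rcases Bool.eq_false_or_eq_true ((PySem.Str.isIn "math" ds || (PySem.Str.isIn "dapo" ds || (PySem.Str.isIn "deepscaler" ds || (PySem.Str.isIn "or1" ds || PySem.Str.isIn "skywork" ds))))) with m1|m1 <;>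
  rcases Bool.eq_false_or_eq_true ((PySem.Str.isIn "mmlu" ds || (PySem.Str.isIn "hellaswag" ds || (PySem.Str.isIn "arc" ds || (PySem.Str.isIn "gpqa" ds || (PySem.Str.isIn "multiple_choice" ds || PySem.Str.isIn "multiplechoice" ds)))))) with m2|m2 <;>
  rcases Bool.eq_false_or_eq_true ((PySem.Str.isIn "hitab" ds || (PySem.Str.isIn "multihiertt" ds || (PySem.Str.isIn "table" ds || PySem.Str.isIn "tabular" ds)))) with m3|m3 <;>
  rcases Bool.eq_false_or_eq_true ((PySem.Str.isIn "arc-agi" ds || (PySem.Str.isIn "barc" ds || (PySem.Str.isIn "puzzle" ds || (PySem.Str.isIn "logic" ds || PySem.Str.isIn "zebra" ds))))) with m4|m4 <;>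
  simp only [e0, e1, m0, m1, m2, m3, m4, Bool.or_true, Bool.or_false, reduceIte] <;>
  rfl
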